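-- pv_equiv track=rewrite | github.com/pypi-data/pypi-mirror-401 | packages/CosmoTech-SupplyChain/cosmotech_supplychain-6.4.1-py3-none-any.whl/Supplychain/Transform/production_route.py | get_operations_for_stocks
-- ===== SOURCE A (Python) =====
-- def get_operations_for_stocks(output_op, op_input, stocks):
--     operations = set()
--
--     for stock in stocks:
--         if output_op.get(stock):
--             operations.update(output_op.get(stock).get('Operation', {}))
--             transports = output_op.get(stock).get('TransportOperation', {})
--
--             # Transports are ignored in the production route
--             # If there are transports for the stocks, we will recursively research the previous operations
--             if transports:
--                 previous_stocks = get_stocks_for_operations(op_input, transports)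
--                 previous_operations = get_operations_for_stocks(output_op, op_input, previous_stocks)
--                 operations.update(previous_operations)
--
--     return operations
--
-- def get_stocks_for_operations(op_input, operations):
--     stocks = set()
--     for operation in operations:
--         stock = op_input.get(operation)
--         if stock:
--             stocks.update(set(stock[0]))
--     return stocks
-- ===== SOURCE B (Python) =====
-- def get_operations_for_stocks(output_op, op_input, stocks):
--     # Memoized depth-first traversal: each stock is fully explored at most once
--     # (a visited set), instead of A's re-exploration of shared subgraphs.
--     operations = set()
--     visited = set()
--
--     def visit(stock):
--         if stock in visited:
--             return
--         entry = output_op.get(stock)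
--         if entry:
--             operations.update(entry.get('Operation', ()))
--             for transport in entry.get('TransportOperation', ()):
--                 rows = op_input.get(transport)
--                 if rows:
--                     for previous in rows[0]:
--                         visit(previous)
--         visited.add(stock)
--
--     for stock in stocks:
--         visit(stock)
--     return operations
-- ===== Notes on version B (the rewrite author's own statement) =====
-- stated objective: alternative
-- what changed: A re-explores the predecessor subgraph of a stock from scratch at every encounter via batch recursion; B does one memoized depth-first traversal with a visited set, exploring each stock at most once.
import Mathlib
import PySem

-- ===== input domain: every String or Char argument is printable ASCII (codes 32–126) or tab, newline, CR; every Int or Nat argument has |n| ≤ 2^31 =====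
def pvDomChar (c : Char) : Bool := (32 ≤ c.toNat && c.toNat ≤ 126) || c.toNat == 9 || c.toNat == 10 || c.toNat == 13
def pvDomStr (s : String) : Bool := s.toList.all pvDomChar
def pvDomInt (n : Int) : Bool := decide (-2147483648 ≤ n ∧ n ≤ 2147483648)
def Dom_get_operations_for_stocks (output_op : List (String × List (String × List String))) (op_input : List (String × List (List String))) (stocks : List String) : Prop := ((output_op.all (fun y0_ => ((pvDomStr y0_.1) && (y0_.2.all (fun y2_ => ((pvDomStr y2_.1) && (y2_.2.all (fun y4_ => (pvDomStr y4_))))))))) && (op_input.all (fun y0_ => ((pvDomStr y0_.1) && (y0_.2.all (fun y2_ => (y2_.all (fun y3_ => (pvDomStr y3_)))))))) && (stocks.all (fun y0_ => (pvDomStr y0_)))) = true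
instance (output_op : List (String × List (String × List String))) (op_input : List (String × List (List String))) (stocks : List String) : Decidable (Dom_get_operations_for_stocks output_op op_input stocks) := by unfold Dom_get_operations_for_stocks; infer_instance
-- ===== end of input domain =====

-- B replaces A's re-exploring recursion by a memoized depth-first traversal with a
-- visited set, so each stock is fully explored at most once; equal return values
-- wherever A returns (Pre_ excludes only the inputs on which A raises).

-- ===== PORT A =====
-- get_stocks_for_operations(op_input, operations): 'stock[0]' is ported as rows.headD []
-- under the truthiness guard 'if stock:' (rows ≠ []), where it is exact.
def gsfo (op_input : List (String × List (List String))) (operations : List String) : List String :=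
  operations.foldl (fun stocks operation =>
    match (PySem.Dict.mk op_input).get? operation with
    | none => stocks
    | some rows =>
      if rows.isEmpty then stocks
      else PySem.Set.update stocks (PySem.Set.ofList (rows.headD []))) PySem.Set.empty

-- the recursion of A, on fuel: the fuel only makes the recursion structural
-- (Python has none; on Pre_ inputs the depth is < output_op.length + 1, so the
-- 0-fuel branch is never taken there)
def goA (output_op : List (String × List (String × List String))) (op_input : List (String × List (List String))) : Nat → List String → List String
  | 0, _ => PySem.Set.empty
  | f+1, stocks => stocks.foldl (fun operations stock =>
      match (PySem.Dict.mk output_op).get? stock with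
      | none => operations
      | some entry =>
        if entry.isEmpty then operations
        else
          let operations := PySem.Set.update operations (PySem.Dict.getD (PySem.Dict.mk entry) "Operation" []);
          let transports := PySem.Dict.getD (PySem.Dict.mk entry) "TransportOperation" [];
          if transports.isEmpty then operations
          else PySem.Set.update operations (goA output_op op_input f (gsfo op_input transports))) PySem.Set.empty

def get_operations_for_stocks (output_op : List (String × List (String × List String))) (op_input : List (String × List (List String))) (stocks : List String) : List String :=
  goA output_op op_input (output_op.length + 1) stocks

-- ===== PORT B =====
-- visit(stock), threading the nonlocal state (visited, operations); the same fuel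
-- remark as for A applies (depth of visit < output_op.length + 1 on Pre_ inputs)
def goB (output_op : List (String × List (String × List String))) (op_input : List (String × List (List String))) : Nat → (List String × List String) → String → (List String × List String)
  | 0, st, _ => st
  | f+1, st, stock =>
    if PySem.Set.contains st.1 stock then st
    else
      let st2 :=
        match (PySem.Dict.mk output_op).get? stock with
        | none => st
        | some entry =>
          if entry.isEmpty then st
          else
            let st1 := (st.1, PySem.Set.update st.2 (PySem.Dict.getD (PySem.Dict.mk entry) "Operation" []));
            (PySem.Dict.getD (PySem.Dict.mk entry) "TransportOperation" []).foldl (fun st transport =>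
              match (PySem.Dict.mk op_input).get? transport with
              | none => st
              | some rows =>
                if rows.isEmpty then st
                else (rows.headD []).foldl (fun st previous => goB output_op op_input f st previous) st) st1
      (PySem.Set.add st2.1 stock, st2.2)

def get_operations_for_stocks_alt (output_op : List (String × List (String × List String))) (op_input : List (String × List (List String))) (stocks : List String) : List String :=
  (stocks.foldl (fun st stock => goB output_op op_input (output_op.length + 1) st stock) (PySem.Set.empty, PySem.Set.empty)).2

-- ===== PRECONDITION & SPEC =====
-- successors of a stock in the transport graph: the stocks A recurses into from it
def flatC (op_input : List (String × List (List String))) (trs : List String) : List String :=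
  trs.flatMap (fun op =>
    match (PySem.Dict.mk op_input).get? op with
    | none => []
    | some rows => if rows.isEmpty then [] else rows.headD [])

def succsF (output_op : List (String × List (String × List String))) (op_input : List (String × List (List String))) (s : String) : List String :=
  match (PySem.Dict.mk output_op).get? s with
  | none => []
  | some entry =>
    if entry.isEmpty then []
    else flatC op_input (PySem.Dict.getD (PySem.Dict.mk entry) "TransportOperation" [])

def stepRch (output_op : List (String × List (String × List String))) (op_input : List (String × List (List String))) (xs : List String) : List String :=
  PySem.Set.update xs (xs.flatMap (succsF output_op op_input))

def closureRch (output_op : List (String × List (String × List String))) (op_input : List (String × List (List String))) : Nat → List String → List String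
  | 0, xs => xs
  | n+1, xs => closureRch output_op op_input n (stepRch output_op op_input xs)

def rchFuel (output_op : List (String × List (String × List String))) (op_input : List (String × List (List String))) : Nat :=
  ((output_op.map Prod.fst).flatMap (succsF output_op op_input)).length + 1

-- the successor-closure of one stock (everything A recurses into from it)
def closureOf (output_op : List (String × List (String × List String))) (op_input : List (String × List (List String))) (a : String) : List String :=
  closureRch output_op op_input (rchFuel output_op op_input) (PySem.Set.ofList (succsF output_op op_input a))

def rchFuelS (output_op : List (String × List (String × List String))) (op_input : List (String × List (List String))) (stocks : List String) : Nat :=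
  (stocks ++ (output_op.map Prod.fst).flatMap (succsF output_op op_input)).length + 1

-- all stocks reachable from the given stocks (the stocks A's recursion visits)
def reachS (output_op : List (String × List (String × List String))) (op_input : List (String × List (List String))) (stocks : List String) : List String :=
  closureRch output_op op_input (rchFuelS output_op op_input stocks) (PySem.Set.ofList stocks)

-- Pre_ excludes exactly the inputs on which A raises (RecursionError): a directed
-- cycle in the stock/transport graph REACHABLE from the given stocks; B's traversal
-- recurses through the same cycle and raises there too. Wherever A returns, Pre_ holds.
def Pre_get_operations_for_stocks (output_op : List (String × List (String × List String))) (op_input : List (String × List (List String))) (stocks : List String) : Prop :=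
  ∀ s ∈ reachS output_op op_input stocks, s ∉ closureOf output_op op_input s
instance (output_op : List (String × List (String × List String))) (op_input : List (String × List (List String))) (stocks : List String) : Decidable (Pre_get_operations_for_stocks output_op op_input stocks) := by unfold Pre_get_operations_for_stocks; infer_instance

def pvWitness_get_operations_for_stocks : (List (String × List (String × List String))) × (List (String × List (List String))) × List String :=
  ([("s", [("Operation", ["o1"]), ("TransportOperation", ["t"])]), ("p", [("Operation", ["o2"])])],
   [("t", [["p"]])],
   ["s"])

def Spec_get_operations_for_stocks (output_op : List (String × List (String × List String))) (op_input : List (String × List (List String))) (stocks : List String) (out : List String) : Prop := out = get_operations_for_stocks_alt output_op op_input stocks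
instance (output_op : List (String × List (String × List String))) (op_input : List (String × List (List String))) (stocks : List String) (out : List String) : Decidable (Spec_get_operations_for_stocks output_op op_input stocks out) := by unfold Spec_get_operations_for_stocks; infer_instance

-- ===== CLAIM (what is proved, stated in full; the proofs are below) =====
def Claim_equal_get_operations_for_stocks : Prop := ∀ (output_op : List (String × List (String × List String))) (op_input : List (String × List (List String))) (stocks : List String), Dom_get_operations_for_stocks output_op op_input stocks → Pre_get_operations_for_stocks output_op op_input stocks → Spec_get_operations_for_stocks output_op op_input stocks (get_operations_for_stocks output_op op_input stocks)

-- ===== LEMMAS AND PROOFS =====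

-- proof-side names for the loop bodies of the two ports
def stepA (output_op : List (String × List (String × List String))) (op_input : List (String × List (List String))) (f : Nat) (operations : List String) (stock : String) : List String :=
  match (PySem.Dict.mk output_op).get? stock with
  | none => operations
  | some entry =>
    if entry.isEmpty then operations
    else
      let operations := PySem.Set.update operations (PySem.Dict.getD (PySem.Dict.mk entry) "Operation" []);
      let transports := PySem.Dict.getD (PySem.Dict.mk entry) "TransportOperation" [];
      if transports.isEmpty then operations
      else PySem.Set.update operations (goA output_op op_input f (gsfo op_input transports))

lemma goA_succ (oo : List (String × List (String × List String))) (oi : List (String × List (List String))) (f : Nat) (stocks : List String) :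
    goA oo oi (f+1) stocks = stocks.foldl (stepA oo oi f) [] := rfl

-- the per-stock contribution of A (its full recursive exploration of one stock)
def contrib (oo : List (String × List (String × List String))) (oi : List (String × List (List String))) (s : String) : List String :=
  goA oo oi (oo.length + 1) [s]

def foldUpd (g : String → List String) (a : List String) (l : List String) : List String :=
  l.foldl (fun acc t => PySem.Set.update acc (g t)) a

-- fuel f suffices to fully explore s (every successor chain shorter than f)
def Enough (oo : List (String × List (String × List String))) (oi : List (String × List (List String))) : Nat → String → Prop
  | 0, _ => False
  | f+1, s => ∀ t ∈ succsF oo oi s, Enough oo oi f t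

-- the operations of every visited stock are already collected
def InvP (oo : List (String × List (String × List String))) (oi : List (String × List (List String))) (V P : List String) : Prop :=
  ∀ v ∈ V, ∀ x ∈ contrib oo oi v, x ∈ P

-- ---- PySem.Set.update algebra ----

lemma update_assoc (a b c : List String) :
    PySem.Set.update a (PySem.Set.update b c) = PySem.Set.update (PySem.Set.update a b) c := by
  induction c generalizing b with
  | nil => rw [PySem.Set.update_nil, PySem.Set.update_nil]
  | cons x c ih =>
    rw [PySem.Set.update_cons, PySem.Set.update_cons, ih]
    congr 1
    by_cases hx : x ∈ b
    · rw [PySem.Set.add_of_mem hx, PySem.Set.add_of_mem ((PySem.Set.mem_update a b x).mpr (Or.inr hx))]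
    · rw [PySem.Set.add_of_not_mem hx, PySem.Set.update_append, PySem.Set.update_cons, PySem.Set.update_nil]

lemma update_ofList (a c : List String) :
    PySem.Set.update a (PySem.Set.ofList c) = PySem.Set.update a c := by
  rw [← PySem.Set.update_nil_left, update_assoc, PySem.Set.update_nil]

lemma update_eq_self_of_subset {a c : List String} (h : ∀ x ∈ c, x ∈ a) :
    PySem.Set.update a c = a := by
  induction c generalizing a with
  | nil => exact PySem.Set.update_nil a
  | cons x c ih =>
    rw [PySem.Set.update_cons, PySem.Set.add_of_mem (h x (by simp))]
    exact ih (fun y hy => h y (by simp [hy]))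

lemma mem_update_left {a : List String} {x : String} (h : x ∈ a) (c : List String) :
    x ∈ PySem.Set.update a c := (PySem.Set.mem_update a c x).mpr (Or.inl h)

-- ---- foldUpd ----

lemma foldUpd_cons (g : String → List String) (a : List String) (t : String) (l : List String) :
    foldUpd g a (t :: l) = foldUpd g (PySem.Set.update a (g t)) l := rfl

lemma foldUpd_append (g : String → List String) (a : List String) (l₁ l₂ : List String) :
    foldUpd g a (l₁ ++ l₂) = foldUpd g (foldUpd g a l₁) l₂ := List.foldl_append

lemma mem_foldUpd_left (g : String → List String) {a : List String} {x : String} (h : x ∈ a) :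
    ∀ l, x ∈ foldUpd g a l := by
  intro l
  induction l generalizing a with
  | nil => exact h
  | cons t l ih => exact ih (mem_update_left h (g t))

lemma mem_foldUpd_of_mem (g : String → List String) {t y : String} {l : List String} (ht : t ∈ l) (hy : y ∈ g t) :
    ∀ a, y ∈ foldUpd g a l := by
  intro a
  induction l generalizing a with
  | nil => cases ht
  | cons u l ih =>
    rcases List.mem_cons.mp ht with h | h
    · subst h
      exact mem_foldUpd_left g ((PySem.Set.mem_update a (g t) y).mpr (Or.inr hy)) l
    · exact ih h _

lemma foldUpd_frame (g : String → List String) :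
    ∀ (l : List String) (a : List String), foldUpd g a l = PySem.Set.update a (foldUpd g [] l) := by
  intro l
  induction l with
  | nil => intro a; exact (PySem.Set.update_nil a).symm
  | cons x l ih =>
    intro a
    rw [foldUpd_cons, ih, foldUpd_cons, ih (PySem.Set.update [] (g x)),
        PySem.Set.update_nil_left, update_assoc, update_ofList]

lemma foldUpd_ofList (g : String → List String) (l : List String) (a : List String) :
    foldUpd g a (PySem.Set.ofList l) = foldUpd g a l := by
  induction l using List.reverseRecOn with
  | nil => rfl
  | append_singleton xs x ih =>
    rw [PySem.Set.ofList_append_singleton]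
    by_cases hx : x ∈ PySem.Set.ofList xs
    · rw [PySem.Set.add_of_mem hx, ih, foldUpd_append]
      have hx' : x ∈ xs := (PySem.Set.mem_ofList xs x).mp hx
      show foldUpd g a xs = PySem.Set.update (foldUpd g a xs) (g x)
      exact (update_eq_self_of_subset (fun y hy => mem_foldUpd_of_mem g hx' hy a)).symm
    · rw [PySem.Set.add_of_not_mem hx, foldUpd_append, ih, foldUpd_append]

-- ---- Enough ----

lemma Enough_zero (oo : List (String × List (String × List String))) (oi : List (String × List (List String))) (s : String) :
    ¬ Enough oo oi 0 s := fun h => h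

lemma Enough_mono (oo : List (String × List (String × List String))) (oi : List (String × List (List String))) :
    ∀ {f g : Nat} {s : String}, Enough oo oi f s → f ≤ g → Enough oo oi g s := by
  intro f
  induction f with
  | zero => intro g s h _; exact absurd h (Enough_zero oo oi s)
  | succ f ih =>
    intro g s h hle
    cases g with
    | zero => omega
    | succ g =>
      intro t ht
      exact ih (h t ht) (by omega)

-- Enough at full fuel is hereditary along successors
lemma Enough_succ (oo : List (String × List (String × List String))) (oi : List (String × List (List String)))
    {n : Nat} {s t : String} (h : Enough oo oi (n+1) s) (ht : t ∈ succsF oo oi s) :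
    Enough oo oi (n+1) t :=
  Enough_mono oo oi (h t ht) (Nat.le_succ n)

-- ---- structure of gsfo and succsF ----

lemma flatC_cons (oi : List (String × List (List String))) (op : String) (trs : List String) :
    flatC oi (op :: trs) =
      (match (PySem.Dict.mk oi).get? op with
       | none => []
       | some rows => if rows.isEmpty then [] else rows.headD []) ++ flatC oi trs := by
  simp [flatC]

def bodyG (oi : List (String × List (List String))) (stocks : List String) (operation : String) : List String :=
  match (PySem.Dict.mk oi).get? operation with
  | none => stocks
  | some rows =>
    if rows.isEmpty then stocks
    else PySem.Set.update stocks (PySem.Set.ofList (rows.headD []))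

lemma gsfo_eq_foldl_bodyG (oi : List (String × List (List String))) (trs : List String) :
    gsfo oi trs = trs.foldl (bodyG oi) [] := rfl

lemma gsfo_aux (oi : List (String × List (List String))) :
    ∀ (trs : List String) (s : List String),
      trs.foldl (bodyG oi) s = PySem.Set.update s (flatC oi trs) := by
  intro trs
  induction trs with
  | nil => intro s; exact (PySem.Set.update_nil s).symm
  | cons op trs ih =>
    intro s
    rw [List.foldl_cons, flatC_cons, PySem.Set.update_append, ih]
    congr 1
    unfold bodyG
    cases hop : (PySem.Dict.mk oi).get? op with
    | none => exact (PySem.Set.update_nil s).symm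
    | some rows =>
      cases hr : rows.isEmpty
      · simp only [hr, Bool.false_eq_true, if_false, update_ofList]
      · simp only [hr, if_true, PySem.Set.update_nil]

lemma gsfo_eq_ofList (oi : List (String × List (List String))) (trs : List String) :
    gsfo oi trs = PySem.Set.ofList (flatC oi trs) := by
  rw [gsfo_eq_foldl_bodyG, gsfo_aux oi trs []]
  exact PySem.Set.update_nil_left _

lemma succsF_active (oo : List (String × List (String × List String))) (oi : List (String × List (List String))) {s : String}
    {entry : List (String × List String)} (hget : (PySem.Dict.mk oo).get? s = some entry) (he : entry.isEmpty = false) :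
    succsF oo oi s = flatC oi (PySem.Dict.getD (PySem.Dict.mk entry) "TransportOperation" []) := by
  unfold succsF
  rw [hget]
  simp [he]

-- ---- fuel stability of A ----

lemma goA_stab (oo : List (String × List (String × List String))) (oi : List (String × List (List String))) :
    ∀ (f g : Nat) (l : List String),
      (∀ s ∈ l, Enough oo oi f s) → (∀ s ∈ l, Enough oo oi g s) →
      goA oo oi f l = goA oo oi g l := by
  intro f
  induction f with
  | zero =>
    intro g l hf _
    have hl : l = [] := by
      cases l with
      | nil => rfl
      | cons s l => exact absurd (hf s (by simp)) (Enough_zero oo oi s)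
    subst hl
    cases g <;> rfl
  | succ f ih =>
    intro g l hf hg
    cases g with
    | zero =>
      have hl : l = [] := by
        cases l with
        | nil => rfl
        | cons s l => exact absurd (hg s (by simp)) (Enough_zero oo oi s)
      subst hl; rfl
    | succ g =>
      rw [goA_succ, goA_succ]
      have aux : ∀ (m : List String) (acc : List String),
          (∀ s ∈ m, Enough oo oi (f+1) s) → (∀ s ∈ m, Enough oo oi (g+1) s) →
          m.foldl (stepA oo oi f) acc = m.foldl (stepA oo oi g) acc := by
        intro m
        induction m with
        | nil => intro acc _ _; rfl
        | cons s m ihm =>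
          intro acc hf' hg'
          rw [List.foldl_cons, List.foldl_cons]
          have hstep : stepA oo oi f acc s = stepA oo oi g acc s := by
            unfold stepA
            cases hget : (PySem.Dict.mk oo).get? s with
            | none => rfl
            | some entry =>
              by_cases he : entry.isEmpty
              · simp [he]
              · simp only [Bool.not_eq_true] at he
                simp only [he, Bool.false_eq_true, if_false]
                by_cases htr : (PySem.Dict.getD (PySem.Dict.mk entry) "TransportOperation" []).isEmpty
                · simp [htr]
                · simp only [Bool.not_eq_true] at htr
                  simp only [htr, Bool.false_eq_true, if_false]
                  congr 1
                  apply ih g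
                  · intro t ht
                    rw [gsfo_eq_ofList, PySem.Set.mem_ofList] at ht
                    rw [← succsF_active oo oi hget he] at ht
                    exact hf' s (by simp) t ht
                  · intro t ht
                    rw [gsfo_eq_ofList, PySem.Set.mem_ofList] at ht
                    rw [← succsF_active oo oi hget he] at ht
                    exact hg' s (by simp) t ht
          rw [hstep]
          exact ihm _ (fun u hu => hf' u (by simp [hu])) (fun u hu => hg' u (by simp [hu]))
      exact aux l [] hf hg

lemma stepA_congr (oo : List (String × List (String × List String))) (oi : List (String × List (List String)))
    {f g : Nat} {s : String} (hf : Enough oo oi (f+1) s) (hg : Enough oo oi (g+1) s) (a : List String) :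
    stepA oo oi f a s = stepA oo oi g a s := by
  unfold stepA
  cases hget : (PySem.Dict.mk oo).get? s with
  | none => rfl
  | some entry =>
    by_cases he : entry.isEmpty
    · simp [he]
    · simp only [Bool.not_eq_true] at he
      simp only [he, Bool.false_eq_true, if_false]
      by_cases htr : (PySem.Dict.getD (PySem.Dict.mk entry) "TransportOperation" []).isEmpty
      · simp [htr]
      · simp only [Bool.not_eq_true] at htr
        simp only [htr, Bool.false_eq_true, if_false]
        congr 1
        apply goA_stab
        · intro t ht
          rw [gsfo_eq_ofList, PySem.Set.mem_ofList] at ht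
          rw [← succsF_active oo oi hget he] at ht
          exact hf t ht
        · intro t ht
          rw [gsfo_eq_ofList, PySem.Set.mem_ofList] at ht
          rw [← succsF_active oo oi hget he] at ht
          exact hg t ht

lemma stepA_frame (oo : List (String × List (String × List String))) (oi : List (String × List (List String)))
    (f : Nat) (a : List String) (s : String) :
    stepA oo oi f a s = PySem.Set.update a (stepA oo oi f [] s) := by
  unfold stepA
  cases hget : (PySem.Dict.mk oo).get? s with
  | none => exact (PySem.Set.update_nil a).symm
  | some entry =>
    by_cases he : entry.isEmpty
    · simp only [he, if_true]; exact (PySem.Set.update_nil a).symm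
    · simp only [Bool.not_eq_true] at he
      simp only [he, Bool.false_eq_true, if_false]
      by_cases htr : (PySem.Dict.getD (PySem.Dict.mk entry) "TransportOperation" []).isEmpty
      · simp only [htr, if_true]
        rw [PySem.Set.update_nil_left, update_ofList]
      · simp only [Bool.not_eq_true] at htr
        simp only [htr, Bool.false_eq_true, if_false]
        rw [PySem.Set.update_nil_left, update_assoc, update_ofList]

lemma contrib_eq_stepA' (oo : List (String × List (String × List String))) (oi : List (String × List (List String))) (s : String) :
    contrib oo oi s = stepA oo oi oo.length [] s := by
  unfold contrib
  rw [goA_succ]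
  rfl

lemma contrib_eq_stepA (oo : List (String × List (String × List String))) (oi : List (String × List (List String)))
    {f : Nat} {s : String} (HS : Enough oo oi (oo.length + 1) s) (hf : Enough oo oi (f+1) s) :
    contrib oo oi s = stepA oo oi f [] s := by
  rw [contrib_eq_stepA']
  exact stepA_congr oo oi HS hf []

lemma foldl_stepA_eq_foldUpd (oo : List (String × List (String × List String))) (oi : List (String × List (List String))) {f : Nat} :
    ∀ (l : List String) (a : List String),
      (∀ t ∈ l, Enough oo oi (oo.length + 1) t) → (∀ t ∈ l, Enough oo oi (f+1) t) →
      l.foldl (stepA oo oi f) a = foldUpd (contrib oo oi) a l := by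
  intro l
  induction l with
  | nil => intro a _ _; rfl
  | cons t l ih =>
    intro a hg hl
    rw [List.foldl_cons, foldUpd_cons, stepA_frame,
        ← contrib_eq_stepA oo oi (hg t (by simp)) (hl t (by simp))]
    exact ih _ (fun u hu => hg u (by simp [hu])) (fun u hu => hl u (by simp [hu]))

-- ---- the memoized traversal of B computes A's contributions ----

def bodyT (oo : List (String × List (String × List String))) (oi : List (String × List (List String))) (f : Nat)
    (st : List String × List String) (transport : String) : List String × List String :=
  match (PySem.Dict.mk oi).get? transport with
  | none => st
  | some rows =>
    if rows.isEmpty then st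
    else (rows.headD []).foldl (fun st previous => goB oo oi f st previous) st

lemma goB_succ (oo : List (String × List (String × List String))) (oi : List (String × List (List String)))
    (f : Nat) (st : List String × List String) (s : String) :
    goB oo oi (f+1) st s =
      if PySem.Set.contains st.1 s then st
      else
        let st2 := match (PySem.Dict.mk oo).get? s with
          | none => st
          | some entry =>
            if entry.isEmpty then st
            else (PySem.Dict.getD (PySem.Dict.mk entry) "TransportOperation" []).foldl (bodyT oo oi f)
                   (st.1, PySem.Set.update st.2 (PySem.Dict.getD (PySem.Dict.mk entry) "Operation" []))
        (PySem.Set.add st2.1 s, st2.2) := rfl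

lemma contrib_inactive_none (oo : List (String × List (String × List String))) (oi : List (String × List (List String)))
    {s : String} (hget : (PySem.Dict.mk oo).get? s = none) : contrib oo oi s = [] := by
  rw [contrib_eq_stepA']
  unfold stepA
  rw [hget]

lemma contrib_inactive_empty (oo : List (String × List (String × List String))) (oi : List (String × List (List String)))
    {s : String} {entry : List (String × List String)} (hget : (PySem.Dict.mk oo).get? s = some entry)
    (he : entry.isEmpty = true) : contrib oo oi s = [] := by
  rw [contrib_eq_stepA']
  unfold stepA
  rw [hget]
  simp [he]

lemma mainB (oo : List (String × List (String × List String))) (oi : List (String × List (List String))) :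
    ∀ (f : Nat) (s : String) (st : List String × List String),
      Enough oo oi (oo.length + 1) s → Enough oo oi f s → InvP oo oi st.1 st.2 →
      (goB oo oi f st s).2 = PySem.Set.update st.2 (contrib oo oi s) ∧
      InvP oo oi (goB oo oi f st s).1 (goB oo oi f st s).2 := by
  intro f
  induction f with
  | zero => intro s st _ h _; exact absurd h (Enough_zero oo oi s)
  | succ f IH =>
    have IHfold : ∀ (l : List String) (st : List String × List String),
        (∀ t ∈ l, Enough oo oi (oo.length + 1) t) → (∀ t ∈ l, Enough oo oi f t) → InvP oo oi st.1 st.2 →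
        ((l.foldl (fun st previous => goB oo oi f st previous) st).2 = foldUpd (contrib oo oi) st.2 l ∧
         InvP oo oi (l.foldl (fun st previous => goB oo oi f st previous) st).1
                    (l.foldl (fun st previous => goB oo oi f st previous) st).2) := by
      intro l
      induction l with
      | nil => intro st _ _ h; exact ⟨rfl, h⟩
      | cons t l ihl =>
        intro st hgl hl hInv
        obtain ⟨h1, h2⟩ := IH t st (hgl t (by simp)) (hl t (by simp)) hInv
        obtain ⟨h3, h4⟩ := ihl (goB oo oi f st t) (fun u hu => hgl u (by simp [hu])) (fun u hu => hl u (by simp [hu])) h2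
        rw [List.foldl_cons]
        exact ⟨by rw [h3, h1, foldUpd_cons], h4⟩
    intro s st hGood hEn hInv
    rw [goB_succ]
    by_cases hv : PySem.Set.contains st.1 s
    · simp only [hv, if_true]
      have hs : s ∈ st.1 := (PySem.Set.contains_iff st.1 s).mp hv
      exact ⟨(update_eq_self_of_subset (fun x hx => hInv s hs x hx)).symm, hInv⟩
    · simp only [Bool.not_eq_true] at hv
      simp only [hv, Bool.false_eq_true, if_false]
      cases hget : (PySem.Dict.mk oo).get? s with
      | none =>
        simp only [hget]
        refine ⟨?_, ?_⟩
        · rw [contrib_inactive_none oo oi hget, PySem.Set.update_nil]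
        · intro v hvv x hx
          rcases (PySem.Set.mem_add st.1 s v).mp hvv with h | h
          · exact hInv v h x hx
          · subst h
            rw [contrib_inactive_none oo oi hget] at hx
            cases hx
      | some entry =>
        by_cases he : entry.isEmpty
        · simp only [hget, he, if_true]
          refine ⟨?_, ?_⟩
          · rw [contrib_inactive_empty oo oi hget he, PySem.Set.update_nil]
          · intro v hvv x hx
            rcases (PySem.Set.mem_add st.1 s v).mp hvv with h | h
            · exact hInv v h x hx
            · subst h
              rw [contrib_inactive_empty oo oi hget he] at hx
              cases hx
        · simp only [Bool.not_eq_true] at he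
          simp only [hget, he, Bool.false_eq_true, if_false]
          -- abbreviations
          set Ops := PySem.Dict.getD (PySem.Dict.mk entry) "Operation" [] with hOps
          set trsD := PySem.Dict.getD (PySem.Dict.mk entry) "TransportOperation" [] with htrsD
          have hsucc : succsF oo oi s = flatC oi trsD := succsF_active oo oi hget he
          have hEnSucc : ∀ t ∈ flatC oi trsD, Enough oo oi f t := by
            intro t ht
            rw [← hsucc] at ht
            exact hEn t ht
          have hGoodSucc : ∀ t ∈ flatC oi trsD, Enough oo oi (oo.length + 1) t := by
            intro t ht
            rw [← hsucc] at ht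
            exact Enough_succ oo oi hGood ht
          have hInv1 : InvP oo oi st.1 (PySem.Set.update st.2 Ops) := by
            intro v hvv x hx
            exact mem_update_left (hInv v hvv x hx) Ops
          -- the transports loop
          have innerT : ∀ (trs : List String) (st' : List String × List String),
              (∀ t ∈ flatC oi trs, Enough oo oi (oo.length + 1) t) →
              (∀ t ∈ flatC oi trs, Enough oo oi f t) → InvP oo oi st'.1 st'.2 →
              ((trs.foldl (bodyT oo oi f) st').2 = foldUpd (contrib oo oi) st'.2 (flatC oi trs) ∧
               InvP oo oi (trs.foldl (bodyT oo oi f) st').1 (trs.foldl (bodyT oo oi f) st').2) := by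
            intro trs
            induction trs with
            | nil => intro st' _ _ h; exact ⟨rfl, h⟩
            | cons op trs ihT =>
              intro st' hG' hEn' hInv'
              rw [List.foldl_cons, flatC_cons]
              have hbody : (bodyT oo oi f st' op).2 =
                    foldUpd (contrib oo oi) st'.2
                      (match (PySem.Dict.mk oi).get? op with
                       | none => []
                       | some rows => if rows.isEmpty then [] else rows.headD []) ∧
                  InvP oo oi (bodyT oo oi f st' op).1 (bodyT oo oi f st' op).2 := by
                unfold bodyT
                cases hop : (PySem.Dict.mk oi).get? op with
                | none => exact ⟨rfl, hInv'⟩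
                | some rows =>
                  cases hrw : rows.isEmpty
                  · simp only [hrw, Bool.false_eq_true, if_false]
                    have hmem : ∀ t ∈ rows.headD [], t ∈ flatC oi (op :: trs) := by
                      intro t ht
                      rw [flatC_cons, hop]
                      simp only [hrw, Bool.false_eq_true, if_false]
                      exact List.mem_append_left _ ht
                    exact IHfold (rows.headD []) st'
                      (fun t ht => hG' t (hmem t ht))
                      (fun t ht => hEn' t (hmem t ht))
                      hInv'
                  · simp only [hrw, if_true]
                    exact ⟨rfl, hInv'⟩
              obtain ⟨hb1, hb2⟩ := hbody
              obtain ⟨hc1, hc2⟩ := ihT (bodyT oo oi f st' op)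
                (fun t ht => hG' t (by rw [flatC_cons]; exact List.mem_append_right _ ht))
                (fun t ht => hEn' t (by rw [flatC_cons]; exact List.mem_append_right _ ht))
                hb2
              refine ⟨?_, hc2⟩
              rw [hc1, hb1, foldUpd_append]
          obtain ⟨hT1, hT2⟩ := innerT trsD (st.1, PySem.Set.update st.2 Ops) hGoodSucc hEnSucc hInv1
          -- the value of contrib s
          have hcs : contrib oo oi s = stepA oo oi oo.length [] s := contrib_eq_stepA' oo oi s
          rw [show stepA oo oi oo.length [] s =
                (if trsD.isEmpty then PySem.Set.update [] Ops
                 else PySem.Set.update (PySem.Set.update [] Ops) (goA oo oi oo.length (gsfo oi trsD))) from by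
            unfold stepA
            rw [hget]
            simp only [he, Bool.false_eq_true, if_false]
            rfl] at hcs
          have hval : (trsD.foldl (bodyT oo oi f) (st.1, PySem.Set.update st.2 Ops)).2 =
              PySem.Set.update st.2 (contrib oo oi s) := by
            rw [hT1]
            cases htr : trsD.isEmpty with
            | true =>
              have htrn : trsD = [] := by simpa [List.isEmpty_iff] using htr
              simp only [htr, if_true] at hcs
              rw [htrn]
              show foldUpd (contrib oo oi) (PySem.Set.update st.2 Ops) (flatC oi []) =
                PySem.Set.update st.2 (contrib oo oi s)
              rw [hcs, PySem.Set.update_nil_left, update_ofList]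
              rfl
            | false =>
              simp only [htr, Bool.false_eq_true, if_false] at hcs
              -- s is a key of output_op, so output_op is nonempty
              have hk : ∃ k, oo.length = k + 1 := by
                cases hol : oo.length with
                | zero =>
                  exfalso
                  have hnil : oo = [] := List.length_eq_zero_iff.mp hol
                  have hred : (PySem.Dict.mk ([] : List (String × List (String × List String)))).get? s = none := rfl
                  rw [hnil, hred] at hget
                  cases hget
                | succ k => exact ⟨k, rfl⟩
              obtain ⟨k, hkk⟩ := hk
              have hgoA : goA oo oi oo.length (gsfo oi trsD) = foldUpd (contrib oo oi) [] (flatC oi trsD) := by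
                rw [hkk, goA_succ]
                rw [foldl_stepA_eq_foldUpd oo oi (gsfo oi trsD) [] ?_ ?_]
                · rw [gsfo_eq_ofList, foldUpd_ofList]
                · intro t ht
                  rw [gsfo_eq_ofList, PySem.Set.mem_ofList] at ht
                  exact hGoodSucc t ht
                · intro t ht
                  rw [gsfo_eq_ofList, PySem.Set.mem_ofList, ← hsucc] at ht
                  have := hGood t ht
                  rwa [hkk] at this
              rw [hcs, hgoA, PySem.Set.update_nil_left, update_assoc, update_ofList, foldUpd_frame]
          refine ⟨hval, ?_⟩
          intro v hvv x hx
          rcases (PySem.Set.mem_add _ s v).mp hvv with h | h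
          · exact hT2 v h x hx
          · rw [h] at hx
            show x ∈ (trsD.foldl (bodyT oo oi f) (st.1, PySem.Set.update st.2 Ops)).2
            rw [hval]
            exact (PySem.Set.mem_update st.2 (contrib oo oi s) x).mpr (Or.inr hx)

-- ---- top-level fold of B ----

lemma foldB_eq (oo : List (String × List (String × List String))) (oi : List (String × List (List String))) :
    ∀ (l : List String) (st : List String × List String),
      (∀ t ∈ l, Enough oo oi (oo.length + 1) t) → InvP oo oi st.1 st.2 →
      (l.foldl (fun st stock => goB oo oi (oo.length + 1) st stock) st).2 = foldUpd (contrib oo oi) st.2 l := by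
  intro l
  induction l with
  | nil => intro st _ _; rfl
  | cons t l ihl =>
    intro st hl hInv
    obtain ⟨h1, h2⟩ := mainB oo oi (oo.length + 1) t st (hl t (by simp)) (hl t (by simp)) hInv
    rw [List.foldl_cons, ihl (goB oo oi (oo.length + 1) st t) (fun u hu => hl u (by simp [hu])) h2, h1, foldUpd_cons]

-- ---- closure facts ----

lemma active_mem_keys (oo : List (String × List (String × List String))) {s : String}
    {entry : List (String × List String)} (hget : (PySem.Dict.mk oo).get? s = some entry) :
    s ∈ oo.map Prod.fst := by
  by_contra h
  have hk : s ∉ (PySem.Dict.mk oo).keys := by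
    simpa [PySem.Dict.keys] using h
  rw [(PySem.Dict.get?_eq_none_iff_not_mem_keys _ s).mpr hk] at hget
  cases hget

lemma succsF_mem_keys (oo : List (String × List (String × List String))) (oi : List (String × List (List String)))
    {t u : String} (hu : u ∈ succsF oo oi t) : t ∈ oo.map Prod.fst := by
  unfold succsF at hu
  cases hget : (PySem.Dict.mk oo).get? t with
  | none => rw [hget] at hu; cases hu
  | some entry => exact active_mem_keys oo hget

lemma closure_fix (oo : List (String × List (String × List String))) (oi : List (String × List (List String)))
    {xs : List String} (h : stepRch oo oi xs = xs) : ∀ n, closureRch oo oi n xs = xs := by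
  intro n
  induction n with
  | zero => rfl
  | succ n ih =>
    show closureRch oo oi n (stepRch oo oi xs) = xs
    rw [h, ih]

lemma mem_closure_self (oo : List (String × List (String × List String))) (oi : List (String × List (List String)))
    {x : String} : ∀ (n : Nat) (xs : List String), x ∈ xs → x ∈ closureRch oo oi n xs := by
  intro n
  induction n with
  | zero => intro xs h; exact h
  | succ n ih =>
    intro xs h
    exact ih (stepRch oo oi xs) (mem_update_left h _)

lemma closure_closed (oo : List (String × List (String × List String))) (oi : List (String × List (List String)))
    (P : List String) (hP : ∀ t u, u ∈ succsF oo oi t → u ∈ P) :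
    ∀ (n : Nat) (xs : List String), xs.Nodup → (∀ y ∈ xs, y ∈ P) →
      P.length + 1 ≤ n + xs.length →
      ∀ t ∈ closureRch oo oi n xs, ∀ u ∈ succsF oo oi t, u ∈ closureRch oo oi n xs := by
  intro n
  induction n with
  | zero =>
    intro xs hnd hsub hbd
    have hle : xs.length ≤ P.length := (hnd.subperm (fun y hy => hsub y hy)).length_le
    omega
  | succ n ih =>
    intro xs hnd hsub hbd
    by_cases hfix : stepRch oo oi xs = xs
    · have hcl : closureRch oo oi (n+1) xs = xs := closure_fix oo oi hfix (n+1)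
      rw [hcl]
      intro t ht u hu
      have hmem : u ∈ stepRch oo oi xs :=
        (PySem.Set.mem_update xs _ u).mpr (Or.inr (List.mem_flatMap.mpr ⟨t, ht, hu⟩))
      rwa [hfix] at hmem
    · show ∀ t ∈ closureRch oo oi n (stepRch oo oi xs), ∀ u ∈ succsF oo oi t, u ∈ closureRch oo oi n (stepRch oo oi xs)
      apply ih (stepRch oo oi xs) (PySem.Set.nodup_update xs _ hnd)
      · intro y hy
        rcases (PySem.Set.mem_update xs _ y).mp hy with h | h
        · exact hsub y h
        · rcases List.mem_flatMap.mp h with ⟨t, _, hu⟩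
          exact hP t y hu
      · have hgrow : xs.length + 1 ≤ (stepRch oo oi xs).length := by
          unfold stepRch at hfix ⊢
          rw [PySem.Set.update_eq_append_filter] at hfix ⊢
          rw [List.length_append]
          cases hq : (List.filter (fun y => !PySem.Set.contains xs y)
              (PySem.Set.ofList (xs.flatMap (succsF oo oi)))) with
          | nil => exact absurd (by rw [hq]; simp) hfix
          | cons a q => simp
        omega

def poolL (oo : List (String × List (String × List String))) (oi : List (String × List (List String))) : List String :=
  (oo.map Prod.fst).flatMap (succsF oo oi)

lemma mem_poolL (oo : List (String × List (String × List String))) (oi : List (String × List (List String)))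
    (t : String) (u : String) (hu : u ∈ succsF oo oi t) : u ∈ poolL oo oi :=
  List.mem_flatMap.mpr ⟨t, succsF_mem_keys oo oi hu, hu⟩

lemma closureOf_closed (oo : List (String × List (String × List String))) (oi : List (String × List (List String)))
    {a : String} {t u : String}
    (ht : t ∈ closureOf oo oi a) (hu : u ∈ succsF oo oi t) : u ∈ closureOf oo oi a := by
  refine closure_closed oo oi (poolL oo oi) (mem_poolL oo oi)
    (rchFuel oo oi) (PySem.Set.ofList (succsF oo oi a))
    (PySem.Set.nodup_ofList _) ?_ ?_ t ht u hu
  · intro y hy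
    exact mem_poolL oo oi a y ((PySem.Set.mem_ofList _ y).mp hy)
  · unfold rchFuel poolL
    omega

lemma reachS_closed (oo : List (String × List (String × List String))) (oi : List (String × List (List String)))
    (stocks : List String) {t u : String}
    (ht : t ∈ reachS oo oi stocks) (hu : u ∈ succsF oo oi t) : u ∈ reachS oo oi stocks := by
  refine closure_closed oo oi (stocks ++ poolL oo oi)
    (fun a b hb => List.mem_append_right _ (mem_poolL oo oi a b hb))
    (rchFuelS oo oi stocks) (PySem.Set.ofList stocks)
    (PySem.Set.nodup_ofList _) ?_ ?_ t ht u hu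
  · intro y hy
    exact List.mem_append_left _ ((PySem.Set.mem_ofList _ y).mp hy)
  · unfold rchFuelS poolL
    rw [List.length_append]
    omega

lemma mem_reachS_self (oo : List (String × List (String × List String))) (oi : List (String × List (List String)))
    (stocks : List String) {t : String} (ht : t ∈ stocks) : t ∈ reachS oo oi stocks :=
  mem_closure_self oo oi _ _ ((PySem.Set.mem_ofList stocks t).mpr ht)

-- ---- from Pre_ (no reachable cycle) to Enough (uniform fuel bound on reachable stocks) ----

lemma enough_reach (oo : List (String × List (String × List String))) (oi : List (String × List (List String)))
    (stocks : List String) (hPre : Pre_get_operations_for_stocks oo oi stocks) :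
    ∀ t ∈ reachS oo oi stocks, Enough oo oi (oo.length + 1) t := by
  have aux : ∀ (n : Nat) (s : String), s ∈ reachS oo oi stocks → ∀ (anc : List String), anc.Nodup →
      (∀ a ∈ anc, a ∈ oo.map Prod.fst) → (∀ a ∈ anc, s ∈ closureOf oo oi a) →
      (PySem.Set.ofList (oo.map Prod.fst)).length ≤ n + anc.length →
      Enough oo oi (n+1) s := by
    intro n
    induction n with
    | zero =>
      intro s hsR anc hnd hk hc hbd t ht
      exfalso
      have hsK : s ∈ oo.map Prod.fst := succsF_mem_keys oo oi ht
      have hsA : s ∉ anc := fun h => hPre s hsR (hc s h)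
      have hnd' : (anc ++ [s]).Nodup := by
        simp [List.nodup_append, hnd]
        exact fun a ha heq => hsA (heq ▸ ha)
      have hsub : ∀ y ∈ anc ++ [s], y ∈ PySem.Set.ofList (oo.map Prod.fst) := by
        intro y hy
        rcases List.mem_append.mp hy with h | h
        · exact (PySem.Set.mem_ofList _ y).mpr (hk y h)
        · rw [List.mem_singleton.mp h]
          exact (PySem.Set.mem_ofList _ s).mpr hsK
      have := (hnd'.subperm hsub).length_le
      simp at this
      omega
    | succ m ih =>
      intro s hsR anc hnd hk hc hbd t ht
      have hsK : s ∈ oo.map Prod.fst := succsF_mem_keys oo oi ht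
      have hsA : s ∉ anc := fun h => hPre s hsR (hc s h)
      refine ih t (reachS_closed oo oi stocks hsR ht) (anc ++ [s]) ?_ ?_ ?_ ?_
      · simp [List.nodup_append, hnd]
        exact fun a ha heq => hsA (heq ▸ ha)
      · intro a ha
        rcases List.mem_append.mp ha with h | h
        · exact hk a h
        · rw [List.mem_singleton.mp h]; exact hsK
      · intro a ha
        rcases List.mem_append.mp ha with h | h
        · exact closureOf_closed oo oi (hc a h) ht
        · rw [List.mem_singleton.mp h]
          exact mem_closure_self oo oi _ _ ((PySem.Set.mem_ofList _ t).mpr ht)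
      · simp
        omega
  intro t htR
  have h1 := aux (PySem.Set.ofList (oo.map Prod.fst)).length t htR [] (by simp) (by simp) (by simp) (by simp)
  have h2 : (PySem.Set.ofList (oo.map Prod.fst)).length ≤ oo.length := by
    have := PySem.Set.length_ofList_le (oo.map Prod.fst)
    simpa using this
  exact Enough_mono oo oi h1 (by omega)

-- ===== VERDICT (by name: the statement is the Claim_ definition above) =====
theorem get_operations_for_stocks_spec : Claim_equal_get_operations_for_stocks := by
  intro output_op op_input stocks _hDom hPre
  unfold Spec_get_operations_for_stocks
  have Hreach := enough_reach output_op op_input stocks hPre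
  have Hst : ∀ t ∈ stocks, Enough output_op op_input (output_op.length + 1) t :=
    fun t ht => Hreach t (mem_reachS_self output_op op_input stocks ht)
  have hA : get_operations_for_stocks output_op op_input stocks = foldUpd (contrib output_op op_input) [] stocks := by
    unfold get_operations_for_stocks
    rw [goA_succ]
    exact foldl_stepA_eq_foldUpd output_op op_input stocks [] Hst Hst
  have hB : get_operations_for_stocks_alt output_op op_input stocks = foldUpd (contrib output_op op_input) [] stocks := by
    unfold get_operations_for_stocks_alt
    exact foldB_eq output_op op_input stocks (PySem.Set.empty, PySem.Set.empty) Hst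
      (fun v hv => absurd hv (List.not_mem_nil))
  rw [hA, hB]
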